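-- pv_equiv track=rewrite | github.com/j776w781/EECS-581-Project-3 | src/games/blackjack.py | getBestSum
-- ===== SOURCE A (Python) =====
-- def getBestSum(total):
--     final = total[0]
--     for i in range(1, len(total)):
--         if final + 11 <= 21:
--             final += 11
--         else:
--             final += 1
--     return final
-- ===== SOURCE B (Python) =====
-- def getBestSum(total):
--     f = total[0]
--     steps = len(total) - 1
--     if f > 10:
--         return f + steps
--     k = min((10 - f) // 11 + 1, steps)
--     return f + 11 * k + (steps - k)
-- ===== Notes on version B (the rewrite author's own statement) =====
-- stated objective: faster
-- what changed: Replaced the per-element greedy loop (which never reads elements past index 0) by a closed-form formula computing how many iterations add 11 and how many add 1.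
import Mathlib
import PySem

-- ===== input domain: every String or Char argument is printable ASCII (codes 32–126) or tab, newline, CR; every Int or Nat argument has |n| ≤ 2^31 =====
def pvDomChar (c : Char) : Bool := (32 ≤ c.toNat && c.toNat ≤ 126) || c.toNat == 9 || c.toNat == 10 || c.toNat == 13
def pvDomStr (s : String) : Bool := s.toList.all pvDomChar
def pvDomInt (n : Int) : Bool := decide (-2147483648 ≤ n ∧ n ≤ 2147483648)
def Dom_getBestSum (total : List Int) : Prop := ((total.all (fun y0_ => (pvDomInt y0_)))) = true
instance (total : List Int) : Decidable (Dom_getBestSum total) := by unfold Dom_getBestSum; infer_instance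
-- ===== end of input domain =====

-- B replaces A's O(n) greedy loop by an O(1) closed form (at most ⌈(11-total[0])/11⌉ steps add 11, the rest add 1).
-- ===== PORT A =====
def getBestSum (total : List Int) : Int :=
  let final := PySem.List.pyGetD total 0 0   -- total[0]; Pre_ excludes [] where Python raises IndexError
  (PySem.List.pyRange 1 total.length 1).foldl
    (fun final _ => if final + 11 ≤ 21 then final + 11 else final + 1) final

-- ===== PORT B =====
def getBestSum_alt (total : List Int) : Int :=
  let f := PySem.List.pyGetD total 0 0       -- total[0]; Pre_ excludes [] where Python raises IndexError
  let steps : Int := (total.length : Int) - 1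
  if f > 10 then f + steps
  else
    let k := min (PySem.Int.floordiv (10 - f) 11 + 1) steps
    f + 11 * k + (steps - k)

-- ===== PRECONDITION & SPEC =====
-- Pre_ excludes only the empty list, on which Python A raises IndexError (total[0]).
def Pre_getBestSum (total : List Int) : Prop := total ≠ []
instance (total : List Int) : Decidable (Pre_getBestSum total) := by unfold Pre_getBestSum; infer_instance
def pvWitness_getBestSum : List Int := ([5, 3, 2])
def Spec_getBestSum (total : List Int) (out : Int) : Prop := out = getBestSum_alt total
instance (total : List Int) (out : Int) : Decidable (Spec_getBestSum total out) := by unfold Spec_getBestSum; infer_instance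

-- ===== CLAIM (what is proved, stated in full; the proofs are below) =====
def Claim_equal_getBestSum : Prop := ∀ (total : List Int), Dom_getBestSum total → Pre_getBestSum total → Spec_getBestSum total (getBestSum total)

-- ===== LEMMAS AND PROOFS =====
-- closed-form value of A's loop as a function of the start value and the number of iterations
def pvClosed (f : Int) (m : Nat) : Int :=
  if f > 10 then f + m
  else
    f + 11 * min (PySem.Int.floordiv (10 - f) 11 + 1) (m : Int)
      + ((m : Int) - min (PySem.Int.floordiv (10 - f) 11 + 1) (m : Int))

theorem pvClosed_step (f : Int) (m : Nat) :
    pvClosed f (m + 1) = pvClosed (if f + 11 ≤ 21 then f + 11 else f + 1) m := by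
  have h11 : (0:Int) < 11 := by norm_num
  unfold pvClosed
  simp only [PySem.Int.floordiv_eq_ediv_of_pos h11]
  split_ifs <;> push_cast <;> omega

theorem pvFold_closed (l : List Int) (f : Int) :
    l.foldl (fun a _ => if a + 11 ≤ 21 then a + 11 else a + 1) f = pvClosed f l.length := by
  induction l generalizing f with
  | nil =>
      unfold pvClosed
      simp only [List.foldl_nil, List.length_nil, Nat.cast_zero,
        PySem.Int.floordiv_eq_ediv_of_pos (show (0:Int) < 11 by norm_num)]
      split_ifs <;> omega
  | cons x t ih =>
      simp only [List.foldl_cons, List.length_cons]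
      rw [ih, pvClosed_step]

-- ===== VERDICT (by name: the statement is the Claim_ definition above) =====
theorem getBestSum_spec : Claim_equal_getBestSum := by
  intro total _ hpre
  cases total with
  | nil => exact absurd rfl hpre
  | cons h t =>
      show getBestSum (h :: t) = getBestSum_alt (h :: t)
      unfold getBestSum getBestSum_alt
      simp only [PySem.List.pyGetD_zero_cons, List.length_cons]
      rw [pvFold_closed]
      have hlen : (PySem.List.pyRange 1 ((t.length + 1 : Nat) : Int) 1).length = t.length := by
        rw [PySem.List.length_pyRange_one]; push_cast; omega
      rw [hlen]
      unfold pvClosed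
      have h1 : ((t.length + 1 : Nat) : Int) - 1 = (t.length : Int) := by push_cast; omega
      rw [h1]
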